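-- pv_equiv track=rewrite | github.com/qsimeon/PSY1401Projects | final_project/common_methods.py | find_repeats
-- ===== SOURCE A (Python) =====
-- def find_repeats(seq, length):
--     """
--     Finds repeats of patterns of a fixed length.
--     """
--     i = 0
--     result = []
--     while i < len(seq):
--         if i + 2 * length <= len(seq) and seq[i:i+length] == seq[i+length:i+2*length]:
--             pattern = seq[i:i+length]
--             count = 2
--             j = i + 2 * length
--             while j + length <= len(seq) and seq[j:j+length] == pattern:
--                 count += 1
--                 j += length
--             result.append(f'[{pattern}]{count}')
--             i = j
--
--         else: # move onto the next character
--             result.append(seq[i])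
--             i += 1
--
--     return ''.join(result)
-- ===== SOURCE B (Python) =====
-- def find_repeats(seq, length):
--     """
--     Finds repeats of patterns of a fixed length, via a precomputed
--     run-length table so each position is examined O(1) times.
--     """
--     n = len(seq)
--     # run[i] = number of consecutive positions t >= i with seq[t] == seq[t + length]
--     run = [0] * (n + 1)
--     for i in range(n - length - 1, -1, -1):
--         run[i] = run[i + 1] + 1 if seq[i] == seq[i + length] else 0
--     out = []
--     i = 0
--     while i < n:
--         q = run[i]
--         if q >= length:
--             c = q // length + 1
--             out.append('[' + seq[i:i+length] + ']' + str(c))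
--             i += c * length
--         else:
--             out.append(seq[i])
--             i += 1
--     return ''.join(out)
-- ===== Notes on version B (the rewrite author's own statement) =====
-- stated objective: faster
-- what changed: B precomputes in one backward pass a run table run[i] = length of the streak of positions t>=i with seq[t]==seq[t+length], so the greedy scan reads the repeat count as run[i]//length+1 instead of re-comparing length-sized slices; the excluded length<1 inputs make A loop forever on any nonempty seq.
-- outside the precondition, e.g. on find_repeats('', 0): A returns '', B returns ''; on find_repeats('', -1): A returns '', B raises IndexError
import Mathlib
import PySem

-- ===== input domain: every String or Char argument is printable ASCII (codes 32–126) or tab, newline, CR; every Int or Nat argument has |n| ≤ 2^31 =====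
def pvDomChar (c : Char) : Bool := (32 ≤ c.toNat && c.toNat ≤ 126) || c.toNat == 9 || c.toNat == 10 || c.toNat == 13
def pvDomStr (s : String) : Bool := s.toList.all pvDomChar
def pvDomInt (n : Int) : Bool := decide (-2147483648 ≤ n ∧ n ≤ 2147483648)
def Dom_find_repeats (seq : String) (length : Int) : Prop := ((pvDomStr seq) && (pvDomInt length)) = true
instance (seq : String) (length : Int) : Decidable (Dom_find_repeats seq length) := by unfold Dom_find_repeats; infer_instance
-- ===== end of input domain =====

-- B replaces A's repeated length-sized slice comparisons by a run table built in one
-- backward pass (run i = streak of positions t ≥ i with seq[t] = seq[t+length]), so the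
-- greedy scan reads each repeat count off as run i / length + 1.

-- ===== PORT A =====
-- inner while loop of A: extends j by `length` while the next block equals `pattern`;
-- returns (count, j).  Fuel only makes the recursion structural; with 1 ≤ length the
-- supplied fuel is never exhausted.
def find_repeats_inner (cs : List Char) (length : Int) (pattern : List Char) :
    Nat → Int → Int → Int × Int
  | 0, j, count => (count, j)
  | fuel + 1, j, count =>
    if j + length ≤ (cs.length : Int) ∧
        PySem.List.slice cs (some j) (some (j + length)) = pattern then
      find_repeats_inner cs length pattern fuel (j + length) (count + 1)
    else (count, j)

-- outer while loop of A, one fuel unit per iteration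
def find_repeats_loop (cs : List Char) (length : Int) : Nat → Int → List Char
  | 0, _ => []
  | fuel + 1, i =>
    if i < (cs.length : Int) then
      if i + 2 * length ≤ (cs.length : Int) ∧
          PySem.List.slice cs (some i) (some (i + length)) =
            PySem.List.slice cs (some (i + length)) (some (i + 2 * length)) then
        let pattern := PySem.List.slice cs (some i) (some (i + length))
        let r := find_repeats_inner cs length pattern cs.length (i + 2 * length) 2
        ('[' :: pattern) ++ (']' :: PySem.Int.toChars r.1) ++ find_repeats_loop cs length fuel r.2
      else ((PySem.List.pyGet? cs i).getD ' ') :: find_repeats_loop cs length fuel (i + 1)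
    else []

def find_repeats (seq : String) (length : Int) : String :=
  String.mk (find_repeats_loop seq.toList length (seq.toList.length + 1) 0)

-- ===== PORT B =====
-- Source B's run table, back to front: run[i] = run[i+1]+1 if seq[i]==seq[i+length] else 0
-- (Source B fills a list from the highest index down; this recursion computes the same values)
def find_repeats_run (cs : List Char) (L : Nat) (i : Nat) : Nat :=
  if h : i + L + 1 ≤ cs.length ∧ cs.getD i ' ' = cs.getD (i + L) ' ' then
    find_repeats_run cs L (i + 1) + 1
  else 0
termination_by cs.length - i
decreasing_by omega

-- Source B's scan; `L` is `length` (a nonnegative int under Pre_), Nat division = Python //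
def find_repeats_alt_loop (cs : List Char) (L : Nat) : Nat → Nat → List Char
  | 0, _ => []
  | fuel + 1, i =>
    if i < cs.length then
      let q := find_repeats_run cs L i
      if L ≤ q then
        let c := q / L + 1
        ('[' :: PySem.List.slice cs (some (i : Int)) (some ((i : Int) + (L : Int)))) ++
          (']' :: PySem.Int.toChars (c : Int)) ++ find_repeats_alt_loop cs L fuel (i + c * L)
      else cs.getD i ' ' :: find_repeats_alt_loop cs L fuel (i + 1)
    else []

def find_repeats_alt (seq : String) (length : Int) : String :=
  String.mk (find_repeats_alt_loop seq.toList length.toNat (seq.toList.length + 1) 0)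

-- ===== PRECONDITION & SPEC =====
-- Pre_ excludes length < 1: there A diverges on every nonempty seq (the inner while
-- loop's j never advances) and returns only the empty string for empty seq, where B may
-- instead raise an IndexError.
def Pre_find_repeats (seq : String) (length : Int) : Prop := 1 ≤ length
instance (seq : String) (length : Int) : Decidable (Pre_find_repeats seq length) := by
  unfold Pre_find_repeats; infer_instance

def pvWitness_find_repeats : String × Int := ("abcabcabx", 3)

def Spec_find_repeats (seq : String) (length : Int) (out : String) : Prop := out = find_repeats_alt seq length
instance (seq : String) (length : Int) (out : String) : Decidable (Spec_find_repeats seq length out) := by unfold Spec_find_repeats; infer_instance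

-- ===== CLAIM (what is proved, stated in full; the proofs are below) =====
def Claim_equal_find_repeats : Prop := ∀ (seq : String) (length : Int), Dom_find_repeats seq length → Pre_find_repeats seq length → Spec_find_repeats seq length (find_repeats seq length)

-- ===== LEMMAS AND PROOFS =====

-- position i is "good": comparing seq[i] with seq[i+L] is in range and they agree
def pvGood (cs : List Char) (L i : Nat) : Prop :=
  i + L + 1 ≤ cs.length ∧ cs.getD i ' ' = cs.getD (i + L) ' '

theorem find_repeats_run_ge_iff (cs : List Char) (L : Nat) :
    ∀ (k i : Nat), k ≤ find_repeats_run cs L i ↔ ∀ t < k, pvGood cs L (i + t) := by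
  intro k
  induction k with
  | zero => intro i; simp
  | succ k ih =>
    intro i
    rw [find_repeats_run]
    by_cases h : i + L + 1 ≤ cs.length ∧ cs.getD i ' ' = cs.getD (i + L) ' '
    · rw [dif_pos h, Nat.succ_le_succ_iff, ih (i + 1)]
      constructor
      · intro hall t ht
        rcases Nat.eq_zero_or_pos t with rfl | htpos
        · simpa [pvGood] using h
        · have := hall (t - 1) (by omega)
          have e : i + 1 + (t - 1) = i + t := by omega
          rwa [e] at this
      · intro hall t ht
        have := hall (t + 1) (by omega)
        have e : i + (t + 1) = i + 1 + t := by omega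
        rwa [e] at this
    · rw [dif_neg h]
      constructor
      · intro hk; omega
      · intro hall
        exact absurd (by simpa [pvGood] using hall 0 (by omega)) h

-- slice equality of two in-range length-L windows is pointwise equality
theorem pv_slice_eq_iff (cs : List Char) (L a b : Nat)
    (ha : a + L ≤ cs.length) (hb : b + L ≤ cs.length) :
    PySem.List.slice cs (some (a : Int)) (some ((a : Int) + (L : Int))) =
      PySem.List.slice cs (some (b : Int)) (some ((b : Int) + (L : Int))) ↔
    ∀ t < L, cs.getD (a + t) ' ' = cs.getD (b + t) ' ' := by
  have ea : ((a : Int) + (L : Int)) = (((a + L : Nat)) : Int) := by push_cast; ring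
  have eb : ((b : Int) + (L : Int)) = (((b + L : Nat)) : Int) := by push_cast; ring
  rw [ea, eb, PySem.List.slice_natCast, PySem.List.slice_natCast]
  have la : ((cs.drop a).take (a + L - a)).length = L := by simp; omega
  have lb : ((cs.drop b).take (b + L - b)).length = L := by simp; omega
  constructor
  · intro h t ht
    have h1 := List.getElem_of_eq h (show t < ((cs.drop a).take (a + L - a)).length by omega)
    rw [List.getElem_take, List.getElem_drop, List.getElem_take, List.getElem_drop] at h1
    rw [List.getD_eq_getElem cs ' ' (by omega), List.getD_eq_getElem cs ' ' (by omega)]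
    exact h1
  · intro h
    apply List.ext_getElem (by omega)
    intro t h1 h2
    rw [List.getElem_take, List.getElem_drop, List.getElem_take, List.getElem_drop]
    have ht : t < L := by omega
    have := h t ht
    rwa [List.getD_eq_getElem cs ' ' (by omega), List.getD_eq_getElem cs ' ' (by omega)] at this

-- transitive chain: if the first m*L good-positions hold from i, block m equals block 0
theorem pv_chain (cs : List Char) (L : Nat) :
    ∀ (m i t : Nat), t < L → m * L ≤ find_repeats_run cs L i →
      cs.getD (i + t) ' ' = cs.getD (i + m * L + t) ' ' := by
  intro m
  induction m with
  | zero => intro i t _ _; norm_num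
  | succ m ih =>
    intro i t ht hrun
    have hmono : m * L ≤ (m + 1) * L := Nat.mul_le_mul_right L (Nat.le_succ m)
    have e1 := ih i t ht (le_trans hmono hrun)
    have hg := (find_repeats_run_ge_iff cs L ((m + 1) * L) i).mp hrun (m * L + t)
      (by rw [Nat.succ_mul]; omega)
    have e2 := hg.2
    have ix1 : i + (m * L + t) = i + m * L + t := by omega
    rw [ix1] at e2
    have ix2 : i + m * L + t + L = i + (m + 1) * L + t := by rw [Nat.succ_mul]; omega
    rw [ix2] at e2
    exact e1.trans e2

-- A's outer repeat test is B's run-table test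
theorem pv_cond_iff (cs : List Char) (L : Nat) (hL : 1 ≤ L) (i : Nat) :
    ((i : Int) + 2 * (L : Int) ≤ (cs.length : Int) ∧
      PySem.List.slice cs (some (i : Int)) (some ((i : Int) + (L : Int))) =
        PySem.List.slice cs (some ((i : Int) + (L : Int))) (some ((i : Int) + 2 * (L : Int)))) ↔
    L ≤ find_repeats_run cs L i := by
  rw [find_repeats_run_ge_iff]
  constructor
  · rintro ⟨hbound, hsl⟩
    have hb' : i + 2 * L ≤ cs.length := by omega
    have key := pv_slice_eq_iff cs L i (i + L) (by omega) (by omega)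
    rw [show (((i + L : Nat)) : Int) = (i : Int) + (L : Int) by push_cast; ring,
      show ((i : Int) + (L : Int)) + (L : Int) = (i : Int) + 2 * (L : Int) by ring] at key
    have hpt := key.mp hsl
    intro t htL
    refine ⟨by omega, ?_⟩
    have := hpt t htL
    have ix : i + L + t = i + t + L := by omega
    rwa [ix] at this
  · intro hall
    have hbnd : i + 2 * L ≤ cs.length := by
      have := (hall (L - 1) (by omega)).1
      omega
    refine ⟨by omega, ?_⟩
    have key := pv_slice_eq_iff cs L i (i + L) (by omega) (by omega)
    rw [show (((i + L : Nat)) : Int) = (i : Int) + (L : Int) by push_cast; ring,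
      show ((i : Int) + (L : Int)) + (L : Int) = (i : Int) + 2 * (L : Int) by ring] at key
    rw [key]
    intro t htL
    have := (hall t htL).2
    have ix : i + t + L = i + L + t := by omega
    rwa [ix] at this

-- A's inner loop lands on exactly B's count q/L + 1 and position i + (q/L+1)*L
theorem pv_inner_eq (cs : List Char) (L : Nat) (hL : 1 ≤ L) (i : Nat)
    (hq : L ≤ find_repeats_run cs L i) :
    ∀ (fuel m : Nat), 2 ≤ m → m ≤ find_repeats_run cs L i / L + 1 →
      find_repeats_run cs L i / L + 1 - m < fuel →
      find_repeats_inner cs (L : Int)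
          (PySem.List.slice cs (some (i : Int)) (some ((i : Int) + (L : Int))))
          fuel ((i + m * L : Nat) : Int) ((m : Nat) : Int) =
        (((find_repeats_run cs L i / L + 1 : Nat) : Int),
          ((i + (find_repeats_run cs L i / L + 1) * L : Nat) : Int)) := by
  have hLpos : 0 < L := hL
  set q := find_repeats_run cs L i with hqdef
  set d := q / L with hddef
  have hdL : d * L ≤ q := by rw [hddef]; exact Nat.div_mul_le_self q L
  have hmod : d * L + q % L = q := by
    rw [hddef, Nat.mul_comm]
    exact Nat.div_add_mod q L
  have hqlt : q < (d + 1) * L := by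
    have := Nat.mod_lt q hLpos
    rw [Nat.succ_mul]
    omega
  have hgood : ∀ t < q, pvGood cs L (i + t) :=
    (find_repeats_run_ge_iff cs L q i).mp (le_refl q)
  intro fuel
  induction fuel with
  | zero => intro m _ _ habs; omega
  | succ fuel ih =>
    intro m hm2 hmc hfuel
    rw [find_repeats_inner]
    by_cases hm : m < d + 1
    · -- the next block still matches: take the loop body
      have hmL : m * L ≤ q := by
        have : m ≤ d := by omega
        calc m * L ≤ d * L := Nat.mul_le_mul_right L this
          _ ≤ q := hdL
      have hmL1 : 1 ≤ m * L := by
        have : 1 * 1 ≤ m * L := Nat.mul_le_mul (by omega) hL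
        omega
      have hbnd : i + m * L + L ≤ cs.length := by
        have := (hgood (m * L - 1) (by omega)).1
        omega
      have hiL : i + L ≤ cs.length := by
        have := (hgood (L - 1) (by omega)).1
        omega
      have hsl : PySem.List.slice cs (some ((i + m * L : Nat) : Int))
            (some (((i + m * L : Nat) : Int) + (L : Int))) =
          PySem.List.slice cs (some (i : Int)) (some ((i : Int) + (L : Int))) := by
        rw [pv_slice_eq_iff cs L (i + m * L) i hbnd hiL]
        intro t ht
        exact (pv_chain cs L m i t ht hmL).symm
      rw [if_pos ⟨by push_cast; omega, hsl⟩]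
      have e1 : ((i + m * L : Nat) : Int) + (L : Int) = ((i + (m + 1) * L : Nat) : Int) := by
        push_cast [Nat.succ_mul]; ring
      have e2 : ((m : Nat) : Int) + 1 = (((m + 1 : Nat)) : Int) := by push_cast; ring
      rw [e1, e2]
      exact ih (m + 1) (by omega) (by omega) (by omega)
    · -- m = d + 1: the loop stops here
      have hmeq : m = d + 1 := by omega
      have hnot : ¬ (((i + m * L : Nat) : Int) + (L : Int) ≤ (cs.length : Int) ∧
          PySem.List.slice cs (some ((i + m * L : Nat) : Int))
              (some (((i + m * L : Nat) : Int) + (L : Int))) =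
            PySem.List.slice cs (some (i : Int)) (some ((i : Int) + (L : Int)))) := by
        rintro ⟨hbnd, hsl⟩
        have hbn : i + m * L + L ≤ cs.length := by omega
        have hiL : i + L ≤ cs.length := by
          have := (hgood (L - 1) (by omega)).1
          omega
        have hpt := (pv_slice_eq_iff cs L (i + m * L) i hbn hiL).mp hsl
        -- position where the run breaks
        have hmul : m * L = d * L + L := by rw [hmeq, Nat.succ_mul]
        have hmlt : q % L < L := Nat.mod_lt q hLpos
        have ht0 : q - d * L < L := by omega
        have e1 := pv_chain cs L d i (q - d * L) ht0 hdL
        have ix1 : i + d * L + (q - d * L) = i + q := by omega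
        rw [ix1] at e1
        have e2 := hpt (q - d * L) ht0
        have ix2 : i + m * L + (q - d * L) = i + q + L := by omega
        rw [ix2] at e2
        -- so position i+q is good, giving run ≥ q+1 > q
        have : q + 1 ≤ q := by
          conv_rhs => rw [hqdef]
          rw [find_repeats_run_ge_iff]
          intro t ht
          rcases Nat.lt_or_ge t q with h' | h'
          · exact hgood t h'
          · have htq : t = q := by omega
            subst htq
            exact ⟨by omega, e1.symm.trans e2.symm⟩
        omega
      rw [if_neg hnot, hmeq]

-- the two scans agree step for step
theorem pv_loop_eq (cs : List Char) (L : Nat) (hL : 1 ≤ L) :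
    ∀ (fuel i : Nat), cs.length - i < fuel →
      find_repeats_loop cs (L : Int) fuel (i : Int) = find_repeats_alt_loop cs L fuel i := by
  intro fuel
  induction fuel with
  | zero => intro i h; omega
  | succ fuel ih =>
    intro i h
    by_cases hin : i < cs.length
    · have hin' : (i : Int) < (cs.length : Int) := by exact_mod_cast hin
      by_cases hq : L ≤ find_repeats_run cs L i
      · -- repeat branch on both sides
        have hcond := (pv_cond_iff cs L hL i).mpr hq
        set q := find_repeats_run cs L i with hqdef
        set d := q / L with hddef
        have hLpos : 0 < L := hL
        have hd1 : 1 ≤ d := by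
          rw [hddef]
          exact (Nat.one_le_div_iff hLpos).mpr hq
        have hdL : d * L ≤ q := by rw [hddef]; exact Nat.div_mul_le_self q L
        have hgood : ∀ t < q, pvGood cs L (i + t) :=
          (find_repeats_run_ge_iff cs L q i).mp (le_refl q)
        have hqn : i + q + L ≤ cs.length := by
          have := (hgood (q - 1) (by omega)).1
          omega
        have hcn : (d + 1) * L ≤ q + L := by rw [Nat.succ_mul]; omega
        have hcle : d + 1 ≤ (d + 1) * L := Nat.le_mul_of_pos_right (d + 1) hLpos
        have harg1 : 2 ≤ find_repeats_run cs L i / L + 1 := by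
          rw [← hqdef, ← hddef]; omega
        have harg2 : find_repeats_run cs L i / L + 1 - 2 < cs.length := by
          rw [← hqdef, ← hddef]; omega
        have hinner := pv_inner_eq cs L hL i hq cs.length 2 (by omega) harg1 harg2
        rw [find_repeats_loop, find_repeats_alt_loop, if_pos hin', if_pos hin]
        rw [if_pos hcond]
        have e0 : (i : Int) + 2 * (L : Int) = ((i + 2 * L : Nat) : Int) := by push_cast; ring
        have e1 : ((2 : Nat) : Int) = (2 : Int) := by norm_num
        simp only [← hqdef, ← hddef] at hinner ⊢
        rw [e0]
        have hinner' : find_repeats_inner cs (L : Int)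
            (PySem.List.slice cs (some (i : Int)) (some ((i : Int) + (L : Int))))
            cs.length ((i + 2 * L : Nat) : Int) (2 : Int) =
            (((d + 1 : Nat) : Int), ((i + (d + 1) * L : Nat) : Int)) := by
          rw [← e1]
          exact hinner
        rw [hinner', if_pos hq]
        rw [ih (i + (d + 1) * L) (by omega)]
      · have hcond : ¬ ((i : Int) + 2 * (L : Int) ≤ (cs.length : Int) ∧
            PySem.List.slice cs (some (i : Int)) (some ((i : Int) + (L : Int))) =
              PySem.List.slice cs (some ((i : Int) + (L : Int)))
                (some ((i : Int) + 2 * (L : Int)))) := by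
          rw [pv_cond_iff cs L hL i]
          omega
        rw [find_repeats_loop, find_repeats_alt_loop, if_pos hin', if_pos hin,
          if_neg hcond, if_neg hq]
        have hget : PySem.List.pyGet? cs (i : Int) = some cs[i] := by
          rw [PySem.List.pyGet?_natCast]
          exact List.getElem?_eq_getElem hin
        rw [hget]
        rw [List.getD_eq_getElem cs ' ' hin]
        have e : (i : Int) + 1 = ((i + 1 : Nat) : Int) := by push_cast; ring
        rw [e, ih (i + 1) (by omega)]
        rfl
    · have hin' : ¬ ((i : Int) < (cs.length : Int)) := by exact_mod_cast hin
      rw [find_repeats_loop, find_repeats_alt_loop, if_neg hin', if_neg hin]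

-- ===== VERDICT (by name: the statement is the Claim_ definition above) =====
theorem find_repeats_spec : Claim_equal_find_repeats := by
  intro seq length _hdom hpre
  unfold Spec_find_repeats find_repeats find_repeats_alt
  have h1 : (1 : Int) ≤ length := hpre
  have hL : length = ((length.toNat : Nat) : Int) := by omega
  rw [hL]
  congr 1
  rw [Int.toNat_natCast]
  exact pv_loop_eq seq.toList length.toNat (by omega) (seq.toList.length + 1) 0 (by omega)
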